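-- pv_equiv track=rewrite | github.com/kvm777/mcb | Avanthi/new3.py | strconvert
-- ===== SOURCE A (Python) =====
-- def strconvert(s):
--     #write your code..
--     l = ""
--     u = ""
--     n = ""
--     sp = ""
--     for i in s:
--         if i.isupper():
--             u+=i
--         elif i.islower():
--             l+=i
--         elif i.isdigit():
--             n+=i
--         else:
--             sp+=i
--
--     return l+u+n+sp
-- ===== SOURCE B (Python) =====
-- def strconvert(s):
--     low = ''.join(c for c in s if c.islower())
--     up = ''.join(c for c in s if c.isupper())
--     dig = ''.join(c for c in s if c.isdigit())
--     sp = ''.join(c for c in s if not (c.isupper() or c.islower() or c.isdigit()))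
--     return low + up + dig + sp
-- ===== Notes on version B (the rewrite author's own statement) =====
-- stated objective: idiomatic
-- what changed: Replaced the single branching loop with four accumulators by four independent filtering comprehensions (one per character class) joined in A's l+u+n+sp order.
import Mathlib
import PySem

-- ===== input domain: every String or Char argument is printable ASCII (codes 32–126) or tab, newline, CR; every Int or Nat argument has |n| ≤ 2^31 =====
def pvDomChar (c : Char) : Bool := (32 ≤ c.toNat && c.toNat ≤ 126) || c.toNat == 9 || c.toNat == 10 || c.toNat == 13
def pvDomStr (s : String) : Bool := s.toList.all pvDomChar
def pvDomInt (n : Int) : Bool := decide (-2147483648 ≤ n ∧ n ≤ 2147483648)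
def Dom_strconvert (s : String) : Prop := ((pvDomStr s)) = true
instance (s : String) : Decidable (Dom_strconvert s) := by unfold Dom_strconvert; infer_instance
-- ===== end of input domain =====

-- B re-groups the characters by four independent filters instead of A's single four-accumulator loop; same output, same cost (objective: idiomatic).

-- ===== PORT A =====
-- one pass, four string accumulators, branch order isupper / islower / isdigit / else
def strconvertStep (acc : List Char × List Char × List Char × List Char) (i : Char) :
    List Char × List Char × List Char × List Char :=
  let (l, u, n, sp) := acc
  if PySem.Chars.isupper i then (l, u ++ [i], n, sp)
  else if PySem.Chars.islower i then (l ++ [i], u, n, sp)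
  else if PySem.Chars.isdigit i then (l, u, n ++ [i], sp)
  else (l, u, n, sp ++ [i])

def strconvert (s : String) : String :=
  let r := s.toList.foldl strconvertStep ([], [], [], [])
  String.ofList (r.1 ++ (r.2.1 ++ (r.2.2.1 ++ r.2.2.2)))

-- ===== PORT B =====
-- four filtering comprehensions joined in l+u+n+sp order
def strconvert_alt (s : String) : String :=
  let cs := s.toList
  String.ofList ((cs.filter (fun c => PySem.Chars.islower c)) ++
             ((cs.filter (fun c => PySem.Chars.isupper c)) ++
              ((cs.filter (fun c => PySem.Chars.isdigit c)) ++
               (cs.filter (fun c => !(PySem.Chars.isupper c || PySem.Chars.islower c || PySem.Chars.isdigit c))))))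

-- ===== PRECONDITION & SPEC =====
def Spec_strconvert (s : String) (out : String) : Prop := out = strconvert_alt s
instance (s : String) (out : String) : Decidable (Spec_strconvert s out) := by unfold Spec_strconvert; infer_instance

-- ===== CLAIM (what is proved, stated in full; the proofs are below) =====
def Claim_equal_strconvert : Prop := ∀ (s : String), Dom_strconvert s → Spec_strconvert s (strconvert s)

-- ===== LEMMAS AND PROOFS =====

theorem upper_not_lower {c : Char} (h : PySem.Chars.isupper c = true) :
    PySem.Chars.islower c = false := by
  simp [PySem.Chars.isupper, PySem.Chars.islower, Char.le_def, UInt32.le_iff_toNat_le] at *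
  intro h2
  omega

theorem upper_not_digit {c : Char} (h : PySem.Chars.isupper c = true) :
    PySem.Chars.isdigit c = false := by
  simp [PySem.Chars.isupper, PySem.Chars.isdigit, Char.le_def, UInt32.le_iff_toNat_le] at *
  intro h2
  omega

theorem lower_not_digit {c : Char} (h : PySem.Chars.islower c = true) :
    PySem.Chars.isdigit c = false := by
  simp [PySem.Chars.islower, PySem.Chars.isdigit, Char.le_def, UInt32.le_iff_toNat_le] at *
  intro h2
  omega

theorem strconvert_loop_eq (cs : List Char) (l u n sp : List Char) :
    cs.foldl strconvertStep (l, u, n, sp) =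
      (l ++ cs.filter (fun c => PySem.Chars.islower c),
       u ++ cs.filter (fun c => PySem.Chars.isupper c),
       n ++ cs.filter (fun c => PySem.Chars.isdigit c),
       sp ++ cs.filter (fun c => !(PySem.Chars.isupper c || PySem.Chars.islower c || PySem.Chars.isdigit c))) := by
  induction cs generalizing l u n sp with
  | nil => simp
  | cons c cs ih =>
    simp only [List.foldl_cons, strconvertStep]
    by_cases hu : PySem.Chars.isupper c = true
    · simp [hu, ih, upper_not_lower hu, upper_not_digit hu]
    · by_cases hl : PySem.Chars.islower c = true
      · simp [hu, hl, ih, lower_not_digit hl]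
      · by_cases hd : PySem.Chars.isdigit c = true
        · simp [hu, hl, hd, ih]
        · simp [hu, hl, hd, ih]

-- ===== VERDICT (by name: the statement is the Claim_ definition above) =====
theorem strconvert_spec : Claim_equal_strconvert := by
  intro s _
  unfold Spec_strconvert strconvert strconvert_alt
  simp [strconvert_loop_eq]
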